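-- pv_equiv track=rewrite | github.com/s-kav/complexity_cost_profiler | src/benchmark_algorithms.py | algorithm_quadratic_list_search
-- ===== SOURCE A (Python) =====
-- def algorithm_quadratic_list_search(n: int) -> int:
--     """Quadratic time O(n^2) - Searching for common elements in lists."""
--     list1 = list(range(n))
--     list2 = list(range(n//2, n + n//2))
--     count = 0
--     for item1 in list1:
--         for item2 in list2:
--             if item1 == item2:
--                 count += 1
--     return count
-- ===== SOURCE B (Python) =====
-- def algorithm_quadratic_list_search(n: int) -> int:
--     """Closed form: the two ranges overlap on [n//2, n), of size n - n//2 (0 when n <= 0)."""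
--     return n - n // 2 if n > 0 else 0
-- ===== Notes on version B (the rewrite author's own statement) =====
-- stated objective: faster
-- what changed: Replaces the nested O(n^2) scan over two materialised ranges by the closed-form size of the range intersection, n - n//2 (0 for n <= 0).
import Mathlib
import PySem

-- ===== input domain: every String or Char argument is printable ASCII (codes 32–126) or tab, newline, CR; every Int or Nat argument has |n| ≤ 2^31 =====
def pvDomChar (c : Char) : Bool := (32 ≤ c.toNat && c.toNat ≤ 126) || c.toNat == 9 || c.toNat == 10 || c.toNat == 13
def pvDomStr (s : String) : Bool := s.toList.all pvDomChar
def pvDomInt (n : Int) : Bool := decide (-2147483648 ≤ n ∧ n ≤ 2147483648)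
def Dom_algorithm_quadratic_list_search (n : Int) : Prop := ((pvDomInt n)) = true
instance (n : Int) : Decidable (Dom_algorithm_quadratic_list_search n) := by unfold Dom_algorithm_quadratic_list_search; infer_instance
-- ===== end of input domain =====

-- B replaces the nested O(n^2) scan by the closed-form range-intersection size n - n//2 (objective: faster).


-- ===== PORT A =====
def algorithm_quadratic_list_search (n : Int) : Int :=
  let list1 := PySem.List.pyRange 0 n 1
  let list2 := PySem.List.pyRange (PySem.Int.floordiv n 2) (n + PySem.Int.floordiv n 2) 1
  let count : Int := 0
  list1.foldl (fun count item1 =>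
    list2.foldl (fun count item2 => if item1 = item2 then count + 1 else count) count) count

-- ===== PORT B =====
def algorithm_quadratic_list_search_alt (n : Int) : Int :=
  if n > 0 then n - PySem.Int.floordiv n 2 else 0

-- ===== PRECONDITION & SPEC =====
def Spec_algorithm_quadratic_list_search (n : Int) (out : Int) : Prop := out = algorithm_quadratic_list_search_alt n
instance (n : Int) (out : Int) : Decidable (Spec_algorithm_quadratic_list_search n out) := by unfold Spec_algorithm_quadratic_list_search; infer_instance

-- ===== CLAIM (what is proved, stated in full; the proofs are below) =====
def Claim_equal_algorithm_quadratic_list_search : Prop := ∀ (n : Int), Dom_algorithm_quadratic_list_search n → Spec_algorithm_quadratic_list_search n (algorithm_quadratic_list_search n)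

-- ===== LEMMAS AND PROOFS =====

-- inner loop: counting matches of x in l2 adds l2.count x
theorem pv_inner (x : Int) (l2 : List Int) (c : Int) :
    l2.foldl (fun count item2 => if x = item2 then count + 1 else count) c
      = c + (l2.count x : Int) := by
  induction l2 generalizing c with
  | nil => simp
  | cons y t ih =>
    simp only [List.foldl_cons]
    by_cases h : x = y
    · subst h; rw [if_pos rfl, ih, List.count_cons_self]; push_cast; ring
    · rw [if_neg h, ih]; simp [List.count_cons]; omega

-- outer loop: total is the number of elements of l1 that lie in the nodup list l2
theorem pv_outer (l1 l2 : List Int) (hnd : l2.Nodup) (c : Int) :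
    l1.foldl (fun count item1 =>
        l2.foldl (fun count item2 => if item1 = item2 then count + 1 else count) count) c
      = c + (l1.countP (fun x => decide (x ∈ l2)) : Int) := by
  induction l1 generalizing c with
  | nil => simp
  | cons x t ih =>
    simp only [List.foldl_cons]
    rw [pv_inner, ih, List.countP_cons]
    by_cases hx : x ∈ l2
    · rw [List.count_eq_one_of_mem hnd hx]
      simp [hx]; push_cast; ring
    · rw [List.count_eq_zero_of_not_mem hx]
      simp [hx]

-- ===== VERDICT (by name: the statement is the Claim_ definition above) =====
theorem algorithm_quadratic_list_search_spec : Claim_equal_algorithm_quadratic_list_search := by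
  intro n _
  unfold Spec_algorithm_quadratic_list_search algorithm_quadratic_list_search
        algorithm_quadratic_list_search_alt
  have hfd : PySem.Int.floordiv n 2 = n / 2 := PySem.Int.floordiv_eq_ediv_of_pos (by omega)
  rw [pv_outer _ _ (PySem.List.nodup_pyRange_one _ _)]
  by_cases hn : n > 0
  · have h1 : 0 ≤ n / 2 := by omega
    have h2 : n / 2 ≤ n := by omega
    rw [PySem.List.pyRange_one_append 0 (n / 2) n (by omega) (by omega), List.countP_append]
    have hA : (PySem.List.pyRange 0 (n / 2) 1).countP
        (fun x => decide (x ∈ PySem.List.pyRange (PySem.Int.floordiv n 2) (n + PySem.Int.floordiv n 2) 1)) = 0 := by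
      rw [List.countP_eq_zero]
      intro x hx
      rw [PySem.List.mem_pyRange_one] at hx
      simp only [decide_eq_true_eq, PySem.List.mem_pyRange_one, not_and, hfd]
      omega
    have hB : (PySem.List.pyRange (n / 2) n 1).countP
        (fun x => decide (x ∈ PySem.List.pyRange (PySem.Int.floordiv n 2) (n + PySem.Int.floordiv n 2) 1)) =
        (PySem.List.pyRange (n / 2) n 1).length := by
      rw [List.countP_eq_length]
      intro x hx
      rw [PySem.List.mem_pyRange_one] at hx
      simp only [decide_eq_true_eq, PySem.List.mem_pyRange_one, hfd]
      omega
    rw [hA, hB, PySem.List.length_pyRange_one]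
    simp only [if_pos hn, hfd]
    omega
  · rw [PySem.List.pyRange_one_eq_nil (by omega)]
    simp [hn]
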